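-- pv_equiv track=rewrite | github.com/vngonugondla/EmailAuthenticationSecurity | spf_utils.py | classify_strictness
-- ===== SOURCE A (Python) =====
-- def classify_strictness(record):
--     if not record:
--         return "missing"
--
--     parts = record.lower().split()
--
--     for part in reversed(parts):
--         bare = part.lstrip("+-~?")
--         if bare == "all":
--             if part.startswith("-"):
--                 return "strict (-all)"
--             elif part.startswith("~"):
--                 return "softfail (~all)"
--             elif part.startswith("?"):
--                 return "neutral (?all)"
--             else:
--                 return "permissive (+all)"
--
--     return "no_all_mechanism"
-- ===== SOURCE B (Python) =====
-- LABELS = {"-": "strict (-all)", "~": "softfail (~all)", "?": "neutral (?all)"}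
--
--
-- def _flush(token, verdict):
--     if token.endswith("all") and set(token[:-3]) <= set("+-~?"):
--         return LABELS.get(token[0], "permissive (+all)")
--     return verdict
--
--
-- def classify_strictness(record):
--     if not record:
--         return "missing"
--     verdict = "no_all_mechanism"
--     token = ""
--     for ch in record:
--         if ch.isspace():
--             verdict = _flush(token, verdict)
--             token = ""
--         else:
--             token += ch.lower()
--     return _flush(token, verdict)
-- ===== Notes on version B (the rewrite author's own statement) =====
-- stated objective: alternative
-- what changed: B never builds the token list: it streams over the characters once with a tokenizer state (current token, current verdict), flushing the verdict at each whitespace boundary so later all-tokens overwrite earlier ones, instead of A's split() followed by a reversed scan with early return.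
import Mathlib
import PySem

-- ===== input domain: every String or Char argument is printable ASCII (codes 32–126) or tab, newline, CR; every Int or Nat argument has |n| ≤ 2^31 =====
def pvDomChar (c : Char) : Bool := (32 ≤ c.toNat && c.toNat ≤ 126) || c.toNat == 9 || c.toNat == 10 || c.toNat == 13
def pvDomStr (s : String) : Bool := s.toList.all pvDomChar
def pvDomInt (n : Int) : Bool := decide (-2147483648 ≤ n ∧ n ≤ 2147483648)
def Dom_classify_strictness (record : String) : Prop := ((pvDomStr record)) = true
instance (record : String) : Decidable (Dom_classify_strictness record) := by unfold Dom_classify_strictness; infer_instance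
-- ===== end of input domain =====

-- B streams over the characters once with a tokenizer state (current token, current verdict),
-- flushing the verdict at each whitespace boundary, instead of A's split() + reversed scan
-- with early return (objective: alternative; same cost).

-- ===== PORT A =====
def pvQual (c : Char) : Bool := c == '+' || c == '-' || c == '~' || c == '?'

-- part.lstrip("+-~?"): ported by hand as dropWhile over the qualifier set
-- (exact: Python's lstrip(chars) removes exactly the leading characters occurring in chars)
def pvLstripQual (s : List Char) : List Char := s.dropWhile pvQual

def pvLoopA : List (List Char) → String
  | [] => "no_all_mechanism"
  | part :: rest =>
    if pvLstripQual part = ['a', 'l', 'l'] then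
      if PySem.Chars.startswith part ['-'] then "strict (-all)"
      else if PySem.Chars.startswith part ['~'] then "softfail (~all)"
      else if PySem.Chars.startswith part ['?'] then "neutral (?all)"
      else "permissive (+all)"
    else pvLoopA rest

def classify_strictness (record : String) : String :=
  if record = "" then "missing"
  else pvLoopA ((PySem.Chars.split₀ (PySem.Chars.lower record.toList)).reverse)

-- ===== PORT B =====
def pvLabels : PySem.Dict Char String :=
  PySem.Dict.ofList [('-', "strict (-all)"), ('~', "softfail (~all)"), ('?', "neutral (?all)")]

-- token.endswith("all") and set(token[:-3]) <= set("+-~?")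
def pvIsAllTok (t : List Char) : Bool :=
  PySem.Chars.endswith t ['a', 'l', 'l'] &&
    PySem.Set.issubset (PySem.Set.ofList (PySem.List.slice t none (some (-3))))
      (PySem.Set.ofList ['+', '-', '~', '?'])

-- LABELS.get(token[0], "permissive (+all)"); the pyGet? none branch only totalises token[0]
-- (never taken: a flushed matching token ends in "all", so it is nonempty)
def pvClassB (t : List Char) : String :=
  match PySem.List.pyGet? t 0 with
  | some c => PySem.Dict.getD pvLabels c "permissive (+all)"
  | none => "permissive (+all)"

def pvFlush (token : List Char) (verdict : String) : String :=
  if pvIsAllTok token then pvClassB token else verdict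

-- the for-loop over the characters: state = (current token, current verdict)
def pvScan : List Char → List Char → String → String
  | [], token, verdict => pvFlush token verdict
  | c :: rest, token, verdict =>
    if PySem.Chars.isspace c then pvScan rest [] (pvFlush token verdict)
    else pvScan rest (token ++ [PySem.Chars.lowerChar c]) verdict

def classify_strictness_alt (record : String) : String :=
  if record = "" then "missing"
  else pvScan record.toList [] "no_all_mechanism"

-- ===== PRECONDITION & SPEC =====
def Spec_classify_strictness (record : String) (out : String) : Prop := out = classify_strictness_alt record
instance (record : String) (out : String) : Decidable (Spec_classify_strictness record out) := by unfold Spec_classify_strictness; infer_instance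

-- ===== CLAIM (what is proved, stated in full; the proofs are below) =====
def Claim_equal_classify_strictness : Prop := ∀ (record : String), Dom_classify_strictness record → Spec_classify_strictness record (classify_strictness record)

-- ===== LEMMAS AND PROOFS =====

-- lowering a character does not change whether it is whitespace
theorem pv_isspace_lower (c : Char) :
    PySem.Chars.isspace (PySem.Chars.lowerChar c) = PySem.Chars.isspace c := by
  unfold PySem.Chars.lowerChar
  split_ifs with h
  · simp only [PySem.Chars.isupper, Bool.and_eq_true, decide_eq_true_eq, Char.le_def,
      UInt32.le_iff_toNat_le] at h
    have h2 : 65 ≤ c.toNat ∧ c.toNat ≤ 90 := ⟨by exact_mod_cast h.1, by exact_mod_cast h.2⟩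
    have hval : Nat.isValidChar (c.toNat + 32) := Or.inl (by omega)
    have hv : (Char.ofNat (c.toNat + 32)).toNat = c.toNat + 32 := by
      simp [Char.ofNat, hval]
      try exact Nat.add_zero _
    apply Bool.eq_iff_iff.mpr
    simp only [PySem.Chars.isspace, hv, Bool.or_eq_true, Bool.and_eq_true, decide_eq_true_eq]
    omega
  · rfl

theorem pv_flush_nil (v : String) : pvFlush [] v = v := rfl

-- split₀.go with a non-empty accumulator just prepends it
theorem pv_go_acc (cs : List Char) : ∀ cur acc,
    PySem.Chars.split₀.go cs cur acc = acc.reverse ++ PySem.Chars.split₀.go cs cur [] := by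
  induction cs with
  | nil =>
    intro cur acc
    by_cases h : cur.isEmpty <;> simp [PySem.Chars.split₀.go, h]
  | cons c rest ih =>
    intro cur acc
    simp only [PySem.Chars.split₀.go]
    by_cases hs : PySem.Chars.isspace c
    · simp only [hs, ite_true]
      by_cases h : cur.isEmpty
      · simp only [h, ite_true]
        exact ih [] acc
      · simp only [h, Bool.false_eq_true, ite_false]
        rw [ih [] (cur.reverse :: acc), ih [] [cur.reverse]]
        simp
    · simp only [hs, Bool.false_eq_true, ite_false]
      exact ih (c :: cur) acc

-- the character-level scan computes the flush-fold over the words of the lowered string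
theorem pv_scan_eq (cs : List Char) : ∀ token v,
    pvScan cs token v =
      (PySem.Chars.split₀.go (PySem.Chars.lower cs) token.reverse []).foldl
        (fun v t => pvFlush t v) v := by
  induction cs with
  | nil =>
    intro token v
    cases token with
    | nil => simp [pvScan, PySem.Chars.lower, PySem.Chars.split₀.go, pv_flush_nil]
    | cons t ts => simp [pvScan, PySem.Chars.lower, PySem.Chars.split₀.go]
  | cons c rest ih =>
    intro token v
    have hl : PySem.Chars.lower (c :: rest) = PySem.Chars.lowerChar c :: PySem.Chars.lower rest := rfl
    rw [hl]
    by_cases hs : PySem.Chars.isspace c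
    · have hs' : PySem.Chars.isspace (PySem.Chars.lowerChar c) = true := by
        rw [pv_isspace_lower]; exact hs
      cases token with
      | nil =>
        simp only [pvScan, hs, if_true, PySem.Chars.split₀.go, hs', List.reverse_nil,
          List.isEmpty_nil, pv_flush_nil]
        exact ih [] v
      | cons t ts =>
        simp only [pvScan, hs, if_true, PySem.Chars.split₀.go, hs']
        have hne : ((t :: ts).reverse).isEmpty = false := by
          simp
        simp only [hne, Bool.false_eq_true, ite_false]
        rw [pv_go_acc, List.reverse_cons, List.reverse_nil, List.nil_append,
          List.reverse_reverse, List.foldl_append]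
        simp only [List.foldl_cons, List.foldl_nil]
        exact ih [] (pvFlush (t :: ts) v)
    · have hs' : PySem.Chars.isspace (PySem.Chars.lowerChar c) = false := by
        rw [pv_isspace_lower]; simpa using hs
      simp only [pvScan, hs, Bool.false_eq_true, ite_false, PySem.Chars.split₀.go, hs']
      rw [ih (token ++ [PySem.Chars.lowerChar c]) v]
      simp

theorem pv_slice_take (cs : List Char) :
    PySem.List.slice cs none (some (-3)) = cs.take (cs.length - 3) := by
  simp only [PySem.List.slice, PySem.List.clampIdx]
  norm_num
  split_ifs with h
  · have h3 : cs.length ≤ 3 := by omega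
    simp [Nat.sub_eq_zero_of_le h3]
  · omega

theorem pv_drop_all (pre : List Char) (hall : ∀ c ∈ pre, pvQual c = true) :
    (pre ++ ['a','l','l']).dropWhile pvQual = ['a','l','l'] := by
  rw [List.dropWhile_append]
  have h : pre.dropWhile pvQual = [] := List.dropWhile_eq_nil_iff.mpr (fun x hx => hall x hx)
  simp [h]
  rfl

theorem pv_take_pre (pre : List Char) :
    (pre ++ ['a','l','l']).take ((pre ++ ['a','l','l']).length - 3) = pre := by
  have h : (pre ++ ['a','l','l']).length - 3 = pre.length := by simp
  rw [h, List.take_left]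

theorem pv_qual_mem (c : Char) : pvQual c = true ↔ c ∈ ['+', '-', '~', '?'] := by
  simp [pvQual]
  tauto

-- B's set-inclusion test is membership of every sliced character in the qualifier set
theorem pv_subset_iff (l : List Char) :
    PySem.Set.issubset (PySem.Set.ofList l) (PySem.Set.ofList ['+', '-', '~', '?']) = true ↔
      ∀ c ∈ l, c ∈ ['+', '-', '~', '?'] := by
  simp only [PySem.Set.issubset, List.all_eq_true]
  constructor
  · intro h c hc
    have := h c (by simpa [PySem.Set.mem_ofList] using hc)
    simpa [PySem.Set.contains, PySem.Set.mem_ofList] using this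
  · intro h c hc
    have hc' : c ∈ l := by simpa [PySem.Set.mem_ofList] using hc
    simpa [PySem.Set.contains, PySem.Set.mem_ofList] using h c hc'

-- A's membership test (lstrip of the qualifiers leaves exactly "all") agrees with
-- B's test (ends with "all" and the sliced prefix is a subset of the qualifier set)
theorem pv_cond_eq (t : List Char) : (pvLstripQual t = ['a','l','l']) ↔ pvIsAllTok t = true := by
  constructor
  · intro h
    have h' : t.dropWhile pvQual = ['a','l','l'] := h
    have hsplit : t.takeWhile pvQual ++ ['a','l','l'] = t := by
      rw [← h']; exact List.takeWhile_append_dropWhile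
    simp only [pvIsAllTok, Bool.and_eq_true, pv_slice_take]
    refine ⟨(PySem.Chars.endswith_iff _ _).mpr ⟨_, hsplit⟩, ?_⟩
    rw [pv_subset_iff, ← hsplit, pv_take_pre]
    intro c hc
    exact (pv_qual_mem c).mp (List.mem_takeWhile_imp hc)
  · intro h
    simp only [pvIsAllTok, Bool.and_eq_true, pv_slice_take] at h
    obtain ⟨h1, h2⟩ := h
    obtain ⟨pre, hsplit⟩ := (PySem.Chars.endswith_iff _ _).mp h1
    have hall : ∀ c ∈ pre, pvQual c = true := by
      intro c hc
      have hm : c ∈ t.take (t.length - 3) := by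
        rw [← hsplit, pv_take_pre]; exact hc
      exact (pv_qual_mem c).mpr ((pv_subset_iff _).mp h2 c hm)
    have hd : t.dropWhile pvQual = ['a','l','l'] := by
      rw [← hsplit]; exact pv_drop_all pre hall
    exact hd

theorem pv_getD_labels (c : Char) :
    PySem.Dict.getD pvLabels c "permissive (+all)" =
      if c = '-' then "strict (-all)" else if c = '~' then "softfail (~all)"
      else if c = '?' then "neutral (?all)" else "permissive (+all)" := by
  rcases eq_or_ne c '-' with h|h
  · subst h; decide
  rcases eq_or_ne c '~' with h2|h2
  · subst h2; decide
  rcases eq_or_ne c '?' with h3|h3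
  · subst h3; decide
  have ha : ('-' == c) = false := by simpa using (Ne.symm h)
  have hb : ('~' == c) = false := by simpa using (Ne.symm h2)
  have hc : ('?' == c) = false := by simpa using (Ne.symm h3)
  simp_all [pvLabels, PySem.Dict.ofList, PySem.Dict.update, PySem.Dict.getD,
    PySem.Dict.insert, PySem.Dict.get?, PySem.Dict.empty, PySem.Dict.contains]

theorem pv_startswith_single (c q : Char) (rest : List Char) :
    PySem.Chars.startswith (c :: rest) [q] = (c == q) := by
  simp [PySem.Chars.startswith, List.isPrefixOf, BEq.comm]

-- on a token both versions accept, A's startswith chain equals B's table lookup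
theorem pv_class_eq (t : List Char) (h : pvIsAllTok t = true) :
    (if PySem.Chars.startswith t ['-'] then "strict (-all)"
     else if PySem.Chars.startswith t ['~'] then "softfail (~all)"
     else if PySem.Chars.startswith t ['?'] then "neutral (?all)"
     else "permissive (+all)") = pvClassB t := by
  have h1 : PySem.Chars.endswith t ['a','l','l'] = true := by
    simp only [pvIsAllTok, Bool.and_eq_true] at h
    exact h.1
  obtain ⟨pre, hsplit⟩ := (PySem.Chars.endswith_iff _ _).mp h1
  cases hc : t with
  | nil => rw [hc] at hsplit; simp at hsplit
  | cons c rest =>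
    simp only [pvClassB, PySem.List.pyGet?, PySem.List.pyIdx?]
    norm_num
    rw [pv_getD_labels]
    simp only [pv_startswith_single, beq_iff_eq]

-- A's reversed scan with early return, as a match on the first accepted token
theorem pv_loopA_eq (xs : List (List Char)) :
    pvLoopA xs =
      (match (xs.filter pvIsAllTok).head? with
       | none => "no_all_mechanism"
       | some t => pvClassB t) := by
  induction xs with
  | nil => rfl
  | cons part rest ih =>
    by_cases h : pvIsAllTok part = true
    · simp only [pvLoopA, if_pos ((pv_cond_eq part).mpr h), List.filter_cons, h, if_true,
        List.head?_cons]
      exact pv_class_eq part h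
    · have h' : ¬ pvLstripQual part = ['a','l','l'] := fun hc => h ((pv_cond_eq part).mp hc)
      simp [pvLoopA, h', h, ih]

-- B's verdict accumulator, as a match on the last accepted token
theorem pv_foldl_flush (xs : List (List Char)) (v : String) :
    xs.foldl (fun v t => pvFlush t v) v =
      (match (xs.filter pvIsAllTok).getLast? with
       | none => v
       | some t => pvClassB t) := by
  induction xs using List.reverseRecOn with
  | nil => rfl
  | append_singleton front t ih =>
    rw [List.foldl_append, List.filter_append]
    by_cases h : pvIsAllTok t = true
    · simp [h, pvFlush]
    · simp only [List.foldl_cons, List.foldl_nil, pvFlush, h, Bool.false_eq_true, ite_false,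
        List.filter_cons, List.filter_nil, List.append_nil]
      exact ih

-- ===== VERDICT (by name: the statement is the Claim_ definition above) =====
theorem classify_strictness_spec : Claim_equal_classify_strictness := by
  intro record _
  unfold Spec_classify_strictness classify_strictness classify_strictness_alt
  by_cases hr : record = ""
  · simp [hr]
  · simp only [hr, if_false]
    rw [pv_scan_eq, pv_loopA_eq, pv_foldl_flush]
    simp only [List.filter_reverse, List.head?_reverse, List.reverse_nil]
    rfl
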